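-- pv_equiv track=rewrite | github.com/arraywtf/uglifier | main.py | uglify_html
-- ===== SOURCE A (Python) =====
-- def uglify_html(html_code):
--     ugly_code = ""
--     indentation_level = 0
--     indent_char = "\t"
--
--     for line in html_code.split('\n'):
--         stripped_line = line.strip()
--
--         if stripped_line.startswith("</"):
--             indentation_level -= 1
--
--         ugly_line = indent_char * indentation_level + stripped_line
--         ugly_code += ugly_line + "\n"
--
--         if stripped_line.startswith("<"):
--             indentation_level += 1
--
--     return ugly_code
-- ===== SOURCE B (Python) =====
-- def uglify_html(html_code):
--     # Two-pass decomposition: prefix-sum the indentation levels first, then render.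
--     stripped = [line.strip() for line in html_code.split('\n')]
--     levels = [0]
--     for s in stripped:
--         levels.append(levels[-1] + (1 if s.startswith('<') and not s.startswith('</') else 0))
--     return ''.join(
--         '\t' * (lvl - 1 if s.startswith('</') else lvl) + s + '\n'
--         for s, lvl in zip(stripped, levels)
--     )
-- ===== Notes on version B (the rewrite author's own statement) =====
-- stated objective: alternative
-- what changed: A's single stateful loop mutating one indentation counter while concatenating output is replaced by a two-pass decomposition: first prefix-sum per-line indentation deltas into a levels list, then render each stripped line at its precomputed level and join.
import Mathlib
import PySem

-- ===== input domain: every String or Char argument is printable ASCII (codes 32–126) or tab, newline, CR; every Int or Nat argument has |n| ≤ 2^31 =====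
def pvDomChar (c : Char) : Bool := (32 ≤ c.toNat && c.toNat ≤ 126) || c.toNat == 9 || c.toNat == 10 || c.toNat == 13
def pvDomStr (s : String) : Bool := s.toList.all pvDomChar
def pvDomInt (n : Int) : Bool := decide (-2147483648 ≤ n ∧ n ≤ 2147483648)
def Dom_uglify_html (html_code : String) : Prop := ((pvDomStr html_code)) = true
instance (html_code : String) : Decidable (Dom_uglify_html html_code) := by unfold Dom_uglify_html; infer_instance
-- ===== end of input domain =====

-- B replaces A's single stateful loop by a two-pass decomposition (prefix-summed
-- levels, then rendering); objective: alternative structure, same cost.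

-- ===== PORT A =====
-- A: one fold carrying (output so far, indentation level).
def uglify_html (html_code : String) : String :=
  let st := (PySem.Chars.splitOn html_code.toList ['\n']).foldl
    (fun (st : List Char × Int) line =>
      let stripped := PySem.Chars.strip line
      let lvl := if PySem.Chars.startswith stripped ['<', '/'] then st.2 - 1 else st.2
      (st.1 ++ (List.replicate lvl.toNat '\t' ++ stripped ++ ['\n']),
       if PySem.Chars.startswith stripped ['<'] then lvl + 1 else lvl))
    ([], 0)
  String.ofList st.1

-- ===== PORT B =====
-- per-line indentation delta
def altDelta (s : List Char) : Int :=
  if PySem.Chars.startswith s ['<'] && !PySem.Chars.startswith s ['<', '/'] then 1 else 0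

-- running levels (prefix sums of the deltas), one entry per line
def altLevels : List (List Char) → Int → List Int
  | [], _ => []
  | s :: rest, lvl => lvl :: altLevels rest (lvl + altDelta s)

-- render one line at its level
def altRender (s : List Char) (lvl : Int) : List Char :=
  List.replicate (if PySem.Chars.startswith s ['<', '/'] then lvl - 1 else lvl).toNat '\t'
    ++ s ++ ['\n']

def uglify_html_alt (html_code : String) : String :=
  let stripped := (PySem.Chars.splitOn html_code.toList ['\n']).map PySem.Chars.strip
  String.ofList ((List.zipWith altRender stripped (altLevels stripped 0)).flatten)

-- ===== PRECONDITION & SPEC =====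
def Spec_uglify_html (html_code : String) (out : String) : Prop := out = uglify_html_alt html_code
instance (html_code : String) (out : String) : Decidable (Spec_uglify_html html_code out) := by unfold Spec_uglify_html; infer_instance

-- ===== CLAIM (what is proved, stated in full; the proofs are below) =====
def Claim_equal_uglify_html : Prop := ∀ (html_code : String), Dom_uglify_html html_code → Spec_uglify_html html_code (uglify_html html_code)

-- ===== LEMMAS AND PROOFS =====

-- a line starting with "</" also starts with "<"
theorem startswith_lt_of_close (s : List Char)
    (h : PySem.Chars.startswith s ['<', '/'] = true) :
    PySem.Chars.startswith s ['<'] = true := by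
  rw [PySem.Chars.startswith_iff] at h ⊢
  exact List.IsPrefix.trans ⟨['/'], rfl⟩ h

-- loop invariant: A's fold from (acc, lvl) appends exactly B's rendering of the
-- remaining stripped lines at the levels starting from lvl
theorem fold_eq_render (lines : List (List Char)) (acc : List Char) (lvl : Int) :
    (lines.foldl
      (fun (st : List Char × Int) line =>
        let stripped := PySem.Chars.strip line
        let l := if PySem.Chars.startswith stripped ['<', '/'] then st.2 - 1 else st.2
        (st.1 ++ (List.replicate l.toNat '\t' ++ stripped ++ ['\n']),
         if PySem.Chars.startswith stripped ['<'] then l + 1 else l))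
      (acc, lvl)).1
    = acc ++ (List.zipWith altRender (lines.map PySem.Chars.strip)
        (altLevels (lines.map PySem.Chars.strip) lvl)).flatten := by
  induction lines generalizing acc lvl with
  | nil => simp
  | cons line rest ih =>
    simp only [List.foldl_cons, List.map_cons, altLevels, List.zipWith_cons_cons,
      List.flatten_cons]
    rw [ih]
    by_cases hc : PySem.Chars.startswith (PySem.Chars.strip line) ['<', '/'] = true
    · have ho := startswith_lt_of_close _ hc
      simp [hc, ho, altRender, altDelta, List.append_assoc]
    · by_cases ho : PySem.Chars.startswith (PySem.Chars.strip line) ['<'] = true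
      · simp [hc, ho, altRender, altDelta, List.append_assoc]
      · simp [hc, ho, altRender, altDelta, List.append_assoc]

-- ===== VERDICT (by name: the statement is the Claim_ definition above) =====
theorem uglify_html_spec : Claim_equal_uglify_html := by
  intro html_code _
  unfold Spec_uglify_html uglify_html uglify_html_alt
  simp only []
  rw [fold_eq_render]
  simp
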